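-- pv_equiv track=rewrite | github.com/chatsci/Aeiva | src/aeiva/tool/meta/browser_stack/security.py | _host_matches_allowlist
-- ===== SOURCE A (Python) =====
-- def _host_matches_allowlist(host: str, allowlist: tuple[str, ...]) -> bool:
--     if not allowlist:
--         return True
--     lowered = host.lower()
--     for token in allowlist:
--         if lowered == token:
--             return True
--         if lowered.endswith(f".{token}"):
--             return True
--     return False
-- ===== SOURCE B (Python) =====
-- def _host_matches_allowlist(host: str, allowlist: tuple[str, ...]) -> bool:
--     if not allowlist:
--         return True
--     allowset = set(allowlist)
--     lowered = host.lower()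
--     if lowered in allowset:
--         return True
--     for i in range(len(lowered)):
--         if lowered[i] == '.' and lowered[i + 1:] in allowset:
--             return True
--     return False
-- ===== Notes on version B (the rewrite author's own statement) =====
-- stated objective: alternative
-- what changed: B inverts the traversal: instead of scanning the allowlist and testing endswith('.'+token) per entry, it builds a set of the allowlist once and checks the host's own dot-delimited suffixes (full host plus each substring after a '.') for membership.
import Mathlib
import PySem

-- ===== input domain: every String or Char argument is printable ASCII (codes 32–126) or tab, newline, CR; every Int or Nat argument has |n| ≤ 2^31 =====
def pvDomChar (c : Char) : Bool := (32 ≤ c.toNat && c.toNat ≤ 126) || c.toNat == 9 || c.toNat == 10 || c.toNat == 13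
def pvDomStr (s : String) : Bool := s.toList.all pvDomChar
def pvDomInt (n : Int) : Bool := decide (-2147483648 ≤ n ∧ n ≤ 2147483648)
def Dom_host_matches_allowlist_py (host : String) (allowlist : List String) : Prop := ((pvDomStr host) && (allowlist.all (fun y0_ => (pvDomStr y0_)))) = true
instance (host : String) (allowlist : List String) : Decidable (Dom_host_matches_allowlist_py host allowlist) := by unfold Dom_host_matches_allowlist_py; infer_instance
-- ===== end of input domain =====

-- B inverts the traversal: it builds a set of the allowlist once and checks the host's
-- dot-delimited suffixes for membership, instead of scanning the allowlist with endswith.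

-- ===== PORT A =====
def host_matches_allowlist_py (host : String) (allowlist : List String) : Bool :=
  if allowlist.isEmpty then true
  else
    let lowered := PySem.Str.lower host
    allowlist.any (fun token =>
      (lowered == token) || PySem.Str.endswith lowered ("." ++ token))

-- ===== PORT B =====
def host_matches_allowlist_py_alt (host : String) (allowlist : List String) : Bool :=
  if allowlist.isEmpty then true
  else
    let allowset : PySem.Set String := PySem.Set.ofList allowlist
    let lowered := PySem.Str.lower host
    if PySem.Set.contains allowset lowered then true
    else
      (PySem.List.pyRange 0 ((PySem.Str.len lowered : Int)) 1).any (fun i =>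
        (PySem.Str.pyGet? lowered i == some '.') &&
        PySem.Set.contains allowset (PySem.Str.slice lowered (some (i + 1)) none))

-- ===== PRECONDITION & SPEC =====
def Spec_host_matches_allowlist_py (host : String) (allowlist : List String) (out : Bool) : Prop := out = host_matches_allowlist_py_alt host allowlist
instance (host : String) (allowlist : List String) (out : Bool) : Decidable (Spec_host_matches_allowlist_py host allowlist out) := by unfold Spec_host_matches_allowlist_py; infer_instance

-- ===== CLAIM (what is proved, stated in full; the proofs are below) =====
def Claim_equal_host_matches_allowlist_py : Prop := ∀ (host : String) (allowlist : List String), Dom_host_matches_allowlist_py host allowlist → Spec_host_matches_allowlist_py host allowlist (host_matches_allowlist_py host allowlist)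

-- ===== LEMMAS AND PROOFS =====

-- A list has the suffix '.' :: t exactly when some position k holds '.' and the rest after it is t.
theorem pv_dot_suffix_iff (t l : List Char) :
    ('.' :: t) <:+ l ↔ ∃ k, k < l.length ∧ l[k]? = some '.' ∧ l.drop (k + 1) = t := by
  constructor
  · rintro ⟨p, rfl⟩
    exact ⟨p.length, by simp, by simp, by simp⟩
  · rintro ⟨k, hk, hget, hdrop⟩
    refine ⟨l.take k, ?_⟩
    obtain ⟨hk', hval⟩ := List.getElem?_eq_some_iff.mp hget
    calc l.take k ++ '.' :: t = l.take k ++ l[k] :: l.drop (k + 1) := by rw [hval, hdrop]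
      _ = l.take k ++ l.drop k := by rw [List.drop_eq_getElem_cons hk']
      _ = l := List.take_append_drop k l

theorem pv_A_iff (host : String) (allowlist : List String) :
    host_matches_allowlist_py host allowlist = true ↔
      (allowlist = [] ∨ ∃ t ∈ allowlist,
        PySem.Str.lower host = t ∨ ('.' :: t.toList) <:+ (PySem.Str.lower host).toList) := by
  unfold host_matches_allowlist_py
  rcases eq_or_ne allowlist [] with rfl | hne
  · simp
  · have hemp : allowlist.isEmpty = false := by simpa [List.isEmpty_eq_false_iff] using hne
    simp [hemp, hne, List.any_eq_true, PySem.Chars.endswith_iff]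

theorem pv_B_iff (host : String) (allowlist : List String) :
    host_matches_allowlist_py_alt host allowlist = true ↔
      (allowlist = [] ∨ PySem.Str.lower host ∈ allowlist ∨ ∃ i : Int,
        (0 ≤ i ∧ i < ((PySem.Str.lower host).toList.length : Int)) ∧
        PySem.List.pyGet? (PySem.Str.lower host).toList i = some '.' ∧
        PySem.Str.slice (PySem.Str.lower host) (some (i + 1)) none ∈ allowlist) := by
  unfold host_matches_allowlist_py_alt
  rcases eq_or_ne allowlist [] with rfl | hne
  · simp
  · have hemp : allowlist.isEmpty = false := by simpa [List.isEmpty_eq_false_iff] using hne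
    simp [hemp, hne, List.any_eq_true, PySem.Set.mem_ofList,
      PySem.List.mem_pyRange_one]

theorem host_matches_allowlist_py_spec_aux (host : String) (allowlist : List String) :
    host_matches_allowlist_py host allowlist = host_matches_allowlist_py_alt host allowlist := by
  apply Bool.eq_iff_iff.mpr
  rw [pv_A_iff, pv_B_iff]
  set s := PySem.Str.lower host with hs
  constructor
  · rintro (h | ⟨t, ht, rfl | h⟩)
    · exact Or.inl h
    · exact Or.inr (Or.inl ht)
    · obtain ⟨k, hk, hget, hdrop⟩ := (pv_dot_suffix_iff _ _).mp h
      refine Or.inr (Or.inr ⟨(k : Int), ⟨by positivity, by exact_mod_cast hk⟩, by simp [PySem.List.pyGet?_natCast, hget], ?_⟩)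
      have hslice : PySem.Str.slice s (some ((k : Int) + 1)) none = t := by
        apply String.toList_injective
        rw [show (PySem.Str.slice s (some ((k : Int) + 1)) none).toList
              = PySem.List.slice s.toList (some ((k : Int) + 1)) none from by simp,
            PySem.List.slice_from s.toList (a := (k : Int) + 1) (by positivity)]
        have h2 : ((k : Int) + 1).toNat = k + 1 := by omega
        rw [h2]; exact hdrop
      rw [hslice]; exact ht
  · rintro (h | h | ⟨i, ⟨hi0, hin⟩, hget, hmem⟩)
    · exact Or.inl h
    · exact Or.inr ⟨s, h, Or.inl rfl⟩
    · refine Or.inr ⟨_, hmem, Or.inr ?_⟩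
      apply (pv_dot_suffix_iff _ _).mpr
      refine ⟨i.toNat, by omega, ?_, ?_⟩
      · rw [show i = ((i.toNat : Nat) : Int) from by omega,
            PySem.List.pyGet?_natCast] at hget
        exact hget
      · have hsl : (PySem.Str.slice s (some (i + 1)) none).toList = s.toList.drop (i.toNat + 1) := by
          rw [show (PySem.Str.slice s (some (i + 1)) none).toList
                = PySem.List.slice s.toList (some (i + 1)) none from by simp,
              PySem.List.slice_from s.toList (a := i + 1) (by omega)]
          congr 1
          omega
        rw [hsl]

-- ===== VERDICT (by name: the statement is the Claim_ definition above) =====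
theorem host_matches_allowlist_py_spec : Claim_equal_host_matches_allowlist_py := by
  intro host allowlist _
  exact host_matches_allowlist_py_spec_aux host allowlist
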